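-- pv_equiv track=rewrite | github.com/aboudnairoukh/nonogram_solver | puzzle_solver.py | seen_in_row
-- ===== SOURCE A (Python) =====
-- from typing import List, Tuple, Set, Optional
--
-- BLACK = 0
--
-- UNKNOWN = -1
--
-- Picture = List[List[int]]
--
-- def seen_in_row(picture: Picture, row: int, col: int, unknown_cell: str) \
--         -> int:
--     """This function returns the number of the seen cells in the row
--      of (row,col) cell"""
--     seen_cells = 0
--     for i in range(len(picture[0])):
--         if picture[row][i] == BLACK and i > col:
--             return seen_cells
--         if picture[row][i] == BLACK:
--             seen_cells = 0
--         else: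
--             if picture[row][i] == UNKNOWN:
--                 if unknown_cell == 'black':
--                     if i > col:
--                         return seen_cells
--                     seen_cells = 0
--                 else:
--                     seen_cells += 1
--             else:
--                 seen_cells += 1
--     return seen_cells
-- ===== SOURCE B (Python) =====
-- BLACK = 0
-- UNKNOWN = -1
--
-- def seen_in_row(picture, row, col, unknown_cell):
--     """Size of the seen run around (row, col): expand to the nearest blocking
--     cell on each side of col and return the gap width."""
--     n = len(picture[0])
--
--     def wall(i):
--         c = picture[row][i]
--         return c == BLACK or (c == UNKNOWN and unknown_cell == 'black')
--
--     right = n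
--     for i in range(max(col + 1, 0), n):
--         if wall(i):
--             right = i
--             break
--     left = -1
--     for i in range(min(col, n - 1), -1, -1):
--         if wall(i):
--             left = i
--             break
--     return right - left - 1
-- ===== Notes on version B (the rewrite author's own statement) =====
-- stated objective: alternative
-- what changed: A makes one forward pass over the whole row with a reset-and-count accumulator; B instead expands outward from the pivot: it finds the nearest blocking cell strictly right of col and the nearest blocking cell at or left of col with two short scans and returns the gap width right - left - 1.
import Mathlib
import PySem

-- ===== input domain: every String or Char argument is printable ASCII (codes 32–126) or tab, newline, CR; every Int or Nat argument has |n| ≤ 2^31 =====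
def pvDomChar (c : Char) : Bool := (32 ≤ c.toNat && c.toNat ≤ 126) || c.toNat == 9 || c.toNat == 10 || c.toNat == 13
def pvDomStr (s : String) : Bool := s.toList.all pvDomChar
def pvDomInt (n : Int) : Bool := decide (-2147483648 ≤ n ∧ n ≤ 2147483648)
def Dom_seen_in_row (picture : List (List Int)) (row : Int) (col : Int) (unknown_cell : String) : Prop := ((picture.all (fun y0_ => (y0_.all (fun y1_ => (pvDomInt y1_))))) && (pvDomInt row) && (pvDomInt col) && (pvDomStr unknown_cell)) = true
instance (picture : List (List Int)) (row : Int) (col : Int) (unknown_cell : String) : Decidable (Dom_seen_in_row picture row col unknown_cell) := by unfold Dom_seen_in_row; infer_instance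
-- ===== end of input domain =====

-- B replaces A's whole-row reset-and-count pass by two scans outward from the pivot
-- (nearest blocking cell on each side of col); same cost, different decomposition.


-- ===== PORT A =====
-- picture[row][i]; total encoding of the access, exact under Pre_ (out-of-range access excluded there)
def pvCell (picture : List (List Int)) (row : Int) (i : Int) : Int :=
  PySem.List.pyGetD (PySem.List.pyGetD picture row []) i 0

-- A's for-loop over range(len(picture[0])) with early returns, as structural recursion on the index list
def pvLoopA (picture : List (List Int)) (row : Int) (col : Int) (unknown_cell : String) :
    List Int → Int → Int
  | [], seen => seen
  | i :: rest, seen =>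
    if pvCell picture row i = 0 ∧ i > col then seen
    else if pvCell picture row i = 0 then pvLoopA picture row col unknown_cell rest 0
    else if pvCell picture row i = -1 then
      if unknown_cell = "black" then
        if i > col then seen
        else pvLoopA picture row col unknown_cell rest 0
      else pvLoopA picture row col unknown_cell rest (seen + 1)
    else pvLoopA picture row col unknown_cell rest (seen + 1)

def seen_in_row (picture : List (List Int)) (row : Int) (col : Int) (unknown_cell : String) : Int :=
  pvLoopA picture row col unknown_cell
    (PySem.List.pyRange 0 (PySem.List.len (PySem.List.pyGetD picture 0 ([] : List Int))) 1) 0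

-- ===== PORT B =====
-- Source B's `wall` closure
def pvWall (picture : List (List Int)) (row : Int) (unknown_cell : String) (i : Int) : Bool :=
  pvCell picture row i == 0 || (pvCell picture row i == -1 && unknown_cell == "black")

-- Source B's right scan: first wall in the index list, else the default n
def pvFindR (picture : List (List Int)) (row : Int) (unknown_cell : String) :
    List Int → Int → Int
  | [], dflt => dflt
  | i :: rest, dflt =>
    if pvWall picture row unknown_cell i then i else pvFindR picture row unknown_cell rest dflt

-- Source B's left scan (countdown): first wall in the index list, else -1
def pvFindL (picture : List (List Int)) (row : Int) (unknown_cell : String) :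
    List Int → Int
  | [] => -1
  | i :: rest =>
    if pvWall picture row unknown_cell i then i else pvFindL picture row unknown_cell rest

def seen_in_row_alt (picture : List (List Int)) (row : Int) (col : Int) (unknown_cell : String) : Int :=
  let n := PySem.List.len (PySem.List.pyGetD picture 0 ([] : List Int))
  let right := pvFindR picture row unknown_cell (PySem.List.pyRange (max (col + 1) 0) n 1) n
  let left := pvFindL picture row unknown_cell (PySem.List.pyRange (min col (n - 1)) (-1) (-1))
  right - left - 1

-- ===== PRECONDITION & SPEC =====
-- Pre_ excludes exactly the inputs where Python A raises (IndexError on empty picture, an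
-- out-of-range row reached by a non-empty first row, or a ragged/short row picture[row]
-- whose end is reached before the first blocking cell right of col).
def Pre_seen_in_row (picture : List (List Int)) (row : Int) (col : Int) (unknown_cell : String) : Prop :=
  picture ≠ [] ∧
  ((picture.headD []).length = 0 ∨
    (PySem.Raise.InRange picture.length row ∧
      ((picture.headD []).length ≤ (PySem.List.pyGetD picture row []).length ∨
        ((List.range (PySem.List.pyGetD picture row []).length).any (fun i =>
          decide (col < (i : Int)) &&
            (((PySem.List.pyGetD picture row []).getD i 0 == 0) ||
             (((PySem.List.pyGetD picture row []).getD i 0 == -1) && (unknown_cell == "black"))))) = true)))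
instance (picture : List (List Int)) (row : Int) (col : Int) (unknown_cell : String) : Decidable (Pre_seen_in_row picture row col unknown_cell) := by unfold Pre_seen_in_row; infer_instance

def pvWitness_seen_in_row : List (List Int) × Int × Int × String := ([[1, 0, 1]], 0, 0, "white")

def Spec_seen_in_row (picture : List (List Int)) (row : Int) (col : Int) (unknown_cell : String) (out : Int) : Prop := out = seen_in_row_alt picture row col unknown_cell
instance (picture : List (List Int)) (row : Int) (col : Int) (unknown_cell : String) (out : Int) : Decidable (Spec_seen_in_row picture row col unknown_cell out) := by unfold Spec_seen_in_row; infer_instance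

-- ===== CLAIM (what is proved, stated in full; the proofs are below) =====
def Claim_equal_seen_in_row : Prop := ∀ (picture : List (List Int)) (row : Int) (col : Int) (unknown_cell : String), Dom_seen_in_row picture row col unknown_cell → Pre_seen_in_row picture row col unknown_cell → Spec_seen_in_row picture row col unknown_cell (seen_in_row picture row col unknown_cell)

-- ===== LEMMAS AND PROOFS =====

-- the early-return predicate of A's loop
def pvQ (picture : List (List Int)) (row col : Int) (uc : String) (i : Int) : Bool :=
  pvWall picture row uc i && decide (i > col)

lemma pvFindR_eq (picture : List (List Int)) (row : Int) (uc : String) (l : List Int) (d : Int) :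
    pvFindR picture row uc l d = (l.find? (pvWall picture row uc)).getD d := by
  induction l with
  | nil => rfl
  | cons i rest ih =>
    by_cases h : pvWall picture row uc i
    · simp [pvFindR, h, List.find?_cons_of_pos h]
    · simp only [pvFindR, ih, List.find?_cons_of_neg (by simpa using h)]
      simp [h]

lemma pvFindL_eq (picture : List (List Int)) (row : Int) (uc : String) (l : List Int) :
    pvFindL picture row uc l = (l.find? (pvWall picture row uc)).getD (-1) := by
  induction l with
  | nil => rfl
  | cons i rest ih =>
    by_cases h : pvWall picture row uc i
    · simp [pvFindL, h, List.find?_cons_of_pos h]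
    · simp only [pvFindL, ih]
      simp [h]

lemma pvStepA (picture : List (List Int)) (row col : Int) (uc : String) (i : Int) (rest : List Int) (s : Int) :
    pvLoopA picture row col uc (i :: rest) s =
      if pvWall picture row uc i then
        (if i > col then s else pvLoopA picture row col uc rest 0)
      else pvLoopA picture row col uc rest (s + 1) := by
  show (if pvCell picture row i = 0 ∧ i > col then s
    else if pvCell picture row i = 0 then pvLoopA picture row col uc rest 0
    else if pvCell picture row i = -1 then
      if uc = "black" then
        if i > col then s
        else pvLoopA picture row col uc rest 0
      else pvLoopA picture row col uc rest (s + 1)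
    else pvLoopA picture row col uc rest (s + 1)) = _
  by_cases h0 : pvCell picture row i = 0 <;>
    by_cases h1 : pvCell picture row i = -1 <;>
    by_cases h2 : uc = "black" <;>
    by_cases h3 : i > col <;>
    simp [pvWall, h0, h1, h2, h3]

lemma pvR_bounds (q : Int → Bool) (a n : Int) (ha : a ≤ n) :
    a ≤ ((PySem.List.pyRange a n 1).find? q).getD n ∧
      ((PySem.List.pyRange a n 1).find? q).getD n ≤ n := by
  cases h : (PySem.List.pyRange a n 1).find? q with
  | none => simp only [Option.getD_none]; exact ⟨ha, le_refl n⟩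
  | some x =>
    have hx := List.mem_of_find?_eq_some h
    rw [PySem.List.mem_pyRange_one] at hx
    simp only [Option.getD_some]
    omega

lemma pvR_prefix_false (q : Int → Bool) (a n : Int) (j : Int)
    (hj1 : a ≤ j) (hj2 : j < ((PySem.List.pyRange a n 1).find? q).getD n) (hjn : j < n) :
    q j = false := by
  have hjmem : j ∈ PySem.List.pyRange a n 1 := by
    rw [PySem.List.mem_pyRange_one]; exact ⟨hj1, hjn⟩
  cases h : (PySem.List.pyRange a n 1).find? q with
  | none => simpa using List.find?_eq_none.mp h j hjmem
  | some x =>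
    rw [h] at hj2; simp only [Option.getD_some] at hj2
    obtain ⟨hpx, as, bs, hsplit, hf⟩ := List.find?_eq_some_iff_append.mp h
    have hpair := PySem.List.pairwise_lt_pyRange_one a n
    rw [hsplit] at hpair hjmem
    rcases List.mem_append.mp hjmem with hin | hin
    · simpa using hf j hin
    · rcases List.mem_cons.mp hin with rfl | hin
      · omega
      · exfalso
        have := (List.pairwise_append.mp hpair).2.1
        rcases List.pairwise_cons.mp this with ⟨hlt, _⟩
        exact absurd (hlt j hin) (by omega)

lemma pvRange_neg_split (a m b : Int) (h1 : b ≤ m) (h2 : m ≤ a) :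
    PySem.List.pyRange a b (-1) =
      PySem.List.pyRange a m (-1) ++ PySem.List.pyRange m b (-1) := by
  rw [PySem.List.pyRange_neg_one_eq_reverse a b, PySem.List.pyRange_neg_one_eq_reverse a m,
    PySem.List.pyRange_neg_one_eq_reverse m b,
    PySem.List.pyRange_one_append (b+1) (m+1) (a+1) (by omega) (by omega), List.reverse_append]

lemma pvFind_false_prefix (q : Int → Bool) (l1 l2 : List Int)
    (h : ∀ i ∈ l1, q i = false) :
    ((l1 ++ l2).find? q) = l2.find? q := by
  rw [List.find?_append, List.find?_eq_none.mpr (by intro x hx; simp [h x hx])]; rfl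


lemma pvMainA (picture : List (List Int)) (row col : Int) (uc : String) (n : Int) :
    ∀ (k : Nat) (a s : Int), a ≤ n → (n - a).toNat = k →
      pvLoopA picture row col uc (PySem.List.pyRange a n 1) s =
        (let R := ((PySem.List.pyRange a n 1).find? (pvQ picture row col uc)).getD n
         R - (((PySem.List.pyRange (R - 1) (a - 1) (-1)).find? (pvWall picture row uc)).getD (a - s - 1)) - 1) := by
  intro k
  induction k with
  | zero =>
    intro a s ha hk
    have han : a = n := by omega
    subst han
    rw [PySem.List.pyRange_one_eq_nil (le_refl a)]
    simp only [List.find?_nil, Option.getD_none, pvLoopA]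
    rw [PySem.List.pyRange_neg_one_eq_nil (by omega)]
    simp only [List.find?_nil, Option.getD_none]
    omega
  | succ k ih =>
    intro a s ha hk
    have hlt : a < n := by omega
    rw [PySem.List.pyRange_one_cons hlt, pvStepA]
    by_cases hw : pvWall picture row uc a
    · by_cases hc : a > col
      · -- early return
        have hq : pvQ picture row col uc a = true := by simp [pvQ, hw, hc]
        rw [List.find?_cons_of_pos hq]
        simp only [if_pos hw, if_pos hc, Option.getD_some]
        rw [PySem.List.pyRange_neg_one_eq_nil (by omega)]
        simp only [List.find?_nil, Option.getD_none]
        omega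
      · -- wall at or left of col: reset
        have hq : pvQ picture row col uc a = false := by simp [pvQ, hc]
        rw [List.find?_cons_of_neg (by simp [hq])]
        simp only [if_pos hw, if_neg hc]
        rw [ih (a + 1) 0 (by omega) (by omega)]
        simp only []
        set R' := ((PySem.List.pyRange (a+1) n 1).find? (pvQ picture row col uc)).getD n with hR'
        have hb := pvR_bounds (pvQ picture row col uc) (a+1) n (by omega)
        rw [← hR'] at hb
        have hsplit : PySem.List.pyRange (R' - 1) (a - 1) (-1) =
            PySem.List.pyRange (R' - 1) a (-1) ++ PySem.List.pyRange a (a - 1) (-1) :=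
          pvRange_neg_split _ _ _ (by omega) (by omega)
        rw [hsplit, List.find?_append]
        have hsing : PySem.List.pyRange a (a - 1) (-1) = [a] := by
          rw [PySem.List.pyRange_neg_one_cons (by omega), PySem.List.pyRange_neg_one_eq_nil (by omega)]
        rw [hsing]
        rw [List.find?_cons_of_pos hw]
        cases hfo : (PySem.List.pyRange (R' - 1) a (-1)).find? (pvWall picture row uc) <;>
          simp [hfo]
    · -- not a wall: count it
      have hq : pvQ picture row col uc a = false := by simp [pvQ, hw]
      rw [List.find?_cons_of_neg (by simp [hq])]
      simp only [if_neg hw]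
      rw [ih (a + 1) (s + 1) (by omega) (by omega)]
      simp only []
      set R' := ((PySem.List.pyRange (a+1) n 1).find? (pvQ picture row col uc)).getD n with hR'
      have hb := pvR_bounds (pvQ picture row col uc) (a+1) n (by omega)
      rw [← hR'] at hb
      have hsplit : PySem.List.pyRange (R' - 1) (a - 1) (-1) =
          PySem.List.pyRange (R' - 1) a (-1) ++ PySem.List.pyRange a (a - 1) (-1) :=
        pvRange_neg_split _ _ _ (by omega) (by omega)
      rw [hsplit, List.find?_append]
      have hsing : PySem.List.pyRange a (a - 1) (-1) = [a] := by
        rw [PySem.List.pyRange_neg_one_cons (by omega), PySem.List.pyRange_neg_one_eq_nil (by omega)]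
      rw [hsing]
      rw [List.find?_cons_of_neg (by simp [hw])]
      have : (a + 1) - (s + 1) - 1 = a - s - 1 := by omega
      rw [this]
      cases hfo : (PySem.List.pyRange (R' - 1) a (-1)).find? (pvWall picture row uc) <;>
        simp [hfo]

lemma pvReq (picture : List (List Int)) (row col : Int) (uc : String) (n : Int) :
    ∀ (k : Nat) (a : Int), a ≤ n → (n - a).toNat = k →
      ((PySem.List.pyRange a n 1).find? (pvQ picture row col uc)).getD n =
        ((PySem.List.pyRange (max (col + 1) a) n 1).find? (pvWall picture row uc)).getD n := by
  intro k
  induction k with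
  | zero =>
    intro a ha hk
    rw [PySem.List.pyRange_one_eq_nil (by omega), PySem.List.pyRange_one_eq_nil (by omega)]
    rfl
  | succ k ih =>
    intro a ha hk
    have hlt : a < n := by omega
    by_cases hc : a ≤ col
    · have hq : pvQ picture row col uc a = false := by simp [pvQ]; omega
      rw [PySem.List.pyRange_one_cons hlt, List.find?_cons_of_neg (by simp [hq])]
      rw [ih (a + 1) (by omega) (by omega)]
      have : max (col + 1) a = max (col + 1) (a + 1) := by omega
      rw [this]
    · have hmax : max (col + 1) a = a := by omega
      have hmax' : max (col + 1) (a + 1) = a + 1 := by omega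
      rw [hmax, PySem.List.pyRange_one_cons hlt]
      by_cases hw : pvWall picture row uc a
      · rw [List.find?_cons_of_pos (by simp [pvQ, hw]; omega), List.find?_cons_of_pos hw]
      · rw [List.find?_cons_of_neg (by simp [pvQ, hw]), List.find?_cons_of_neg (by simp [hw])]
        rw [ih (a + 1) (by omega) (by omega), hmax']

lemma pvLeq (picture : List (List Int)) (row col : Int) (uc : String) (n : Int) (hn : 0 ≤ n) :
    (((PySem.List.pyRange ((((PySem.List.pyRange 0 n 1).find? (pvQ picture row col uc)).getD n) - 1) (-1) (-1)).find? (pvWall picture row uc)).getD (-1)) =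
      ((PySem.List.pyRange (min col (n - 1)) (-1) (-1)).find? (pvWall picture row uc)).getD (-1) := by
  set R := ((PySem.List.pyRange 0 n 1).find? (pvQ picture row col uc)).getD n with hR
  have hb := pvR_bounds (pvQ picture row col uc) 0 n hn
  rw [← hR] at hb
  have hpref : ∀ j : Int, col < j → 0 ≤ j → j < R → pvWall picture row uc j = false := by
    intro j hj1 hj2 hj3
    have hqf := pvR_prefix_false (pvQ picture row col uc) 0 n j hj2 (by rw [← hR]; omega) (by omega)
    cases hhw : pvWall picture row uc j with
    | false => rfl
    | true => exfalso; simp [pvQ, hhw] at hqf; omega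
  by_cases hcneg : col < 0
  · -- no wall can be left of col; both sides find nothing
    have hL : (PySem.List.pyRange (R - 1) (-1) (-1)).find? (pvWall picture row uc) = none := by
      apply List.find?_eq_none.mpr
      intro j hj
      rw [PySem.List.mem_pyRange_neg_one] at hj
      simp [hpref j (by omega) (by omega) (by omega)]
    have hmin : min col (n - 1) = col := by omega
    rw [hL, hmin, PySem.List.pyRange_neg_one_eq_nil (by omega)]
    simp
  · by_cases hcn : n ≤ col
    · -- col is right of the whole row: R = n and the two scans are identical
      have hRn : R = n := by
        rw [hR]
        cases hf : (PySem.List.pyRange 0 n 1).find? (pvQ picture row col uc) with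
        | none => simp
        | some x =>
          exfalso
          have hx := List.mem_of_find?_eq_some hf
          rw [PySem.List.mem_pyRange_one] at hx
          have := List.find?_some hf
          simp [pvQ] at this
          omega
      have hmin : min col (n - 1) = n - 1 := by omega
      rw [hRn, hmin]
    · -- 0 ≤ col < n: split the A-side scan at col; the part above col has no walls
      have hcR : col < R := by
        by_contra hcon
        push Not at hcon
        have hfs : ∃ x, (PySem.List.pyRange 0 n 1).find? (pvQ picture row col uc) = some x := by
          cases hf : (PySem.List.pyRange 0 n 1).find? (pvQ picture row col uc) with
          | none => rw [hR, hf] at hcon; simp at hcon; omega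
          | some x => exact ⟨x, rfl⟩
        obtain ⟨x, hf⟩ := hfs
        have := List.find?_some hf
        simp [pvQ] at this
        rw [hR, hf] at hcon
        simp at hcon
        omega
      have hmin : min col (n - 1) = col := by omega
      rw [hmin]
      have hsplit : PySem.List.pyRange (R - 1) (-1) (-1) =
          PySem.List.pyRange (R - 1) col (-1) ++ PySem.List.pyRange col (-1) (-1) :=
        pvRange_neg_split _ _ _ (by omega) (by omega)
      rw [hsplit, pvFind_false_prefix]
      intro j hj
      rw [PySem.List.mem_pyRange_neg_one] at hj
      exact hpref j (by omega) (by omega) (by omega)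

-- ===== VERDICT (by name: the statement is the Claim_ definition above) =====
theorem seen_in_row_spec : Claim_equal_seen_in_row := by
  intro picture row col unknown_cell _ _
  unfold Spec_seen_in_row seen_in_row seen_in_row_alt
  set n := PySem.List.len (PySem.List.pyGetD picture 0 ([] : List Int)) with hn
  have hn0 : 0 ≤ n := by rw [hn, PySem.List.len_eq]; exact Int.natCast_nonneg _
  rw [pvMainA picture row col unknown_cell n (n - 0).toNat 0 0 hn0 rfl]
  simp only [pvFindR_eq, pvFindL_eq]
  rw [← pvReq picture row col unknown_cell n (n - 0).toNat 0 (by omega) rfl]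
  have h1 : (0 : Int) - 0 - 1 = -1 := by norm_num
  have h2 : (0 : Int) - 1 = -1 := by norm_num
  rw [h1, h2]
  rw [pvLeq picture row col unknown_cell n hn0]
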